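-- pv_equiv track=rewrite | github.com/ataudte/ddi-helpers | ib_onedb_overview/ib_onedb_overview.py | parse_option_def_key
-- ===== SOURCE A (Python) =====
-- def parse_option_def_key(s):
--     # Parse strings like 'DHCP..false.33' -> (space, is_ipv6, code). Fallback: trailing digits as code.
--     if not s:
--         return (None, None, None)
--     parts = s.split(".")
--     code = None
--     for p in reversed(parts):
--         if p.isdigit():
--             code = p
--             break
--     space = parts[0] if parts else None
--     is_v6 = None
--     for p in parts:
--         if p.lower() in ("true","false"):
--             is_v6 = (p.lower()=="true")
--             break
--     return (space, is_v6, code)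
-- ===== SOURCE B (Python) =====
-- def parse_option_def_key(s):
--     # Recursive right-fold over the segments: the recursion first computes the
--     # answer for the tail, then the head segment overrides the bool flag
--     # (so the leftmost true/false wins) and fills the code only if the tail
--     # produced none (so the rightmost digit segment wins).
--     if not s:
--         return (None, None, None)
--
--     def go(parts):
--         if not parts:
--             return (None, None)
--         v6, code = go(parts[1:])
--         p = parts[0]
--         low = p.lower()
--         if low in ("true", "false"):
--             v6 = (low == "true")
--         if code is None and p.isdigit():
--             code = p
--         return (v6, code)
--
--     parts = s.split(".")
--     v6, code = go(parts)
--     return (parts[0], v6, code)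
-- ===== Notes on version B (the rewrite author's own statement) =====
-- stated objective: alternative
-- what changed: Replaces A's two iterative break-scans (a reversed scan for the code and a forward scan for the bool) with a single structural recursion from the right over the segment list: the tail's answer is computed first, then the head overrides the bool (leftmost wins) and supplies the code only when the tail had none (rightmost wins).
import Mathlib
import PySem

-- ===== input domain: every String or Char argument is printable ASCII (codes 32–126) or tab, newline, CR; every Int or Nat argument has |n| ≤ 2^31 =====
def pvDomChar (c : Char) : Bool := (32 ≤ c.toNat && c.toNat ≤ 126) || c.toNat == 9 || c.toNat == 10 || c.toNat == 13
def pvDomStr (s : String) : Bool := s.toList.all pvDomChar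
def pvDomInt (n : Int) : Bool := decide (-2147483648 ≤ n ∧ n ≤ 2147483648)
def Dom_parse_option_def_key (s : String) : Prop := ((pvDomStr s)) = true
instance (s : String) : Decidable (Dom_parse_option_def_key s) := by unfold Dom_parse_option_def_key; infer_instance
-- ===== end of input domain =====

-- B replaces A's two iterative break-scans with one structural recursion from the right
-- over the segment list (leftmost bool wins by override, rightmost digit wins by fill-if-none);
-- objective: alternative.

-- ===== PORT A =====
-- the reversed 'for p in reversed(parts): if p.isdigit(): code = p; break' loop
def pvFindCode : List String → Option String
  | [] => none
  | p :: rest => if PySem.Str.strIsdigit p then some p else pvFindCode rest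

-- the forward 'for p in parts: if p.lower() in ("true","false"): is_v6 = …; break' loop
def pvFindV6 : List String → Option Bool
  | [] => none
  | p :: rest =>
    if PySem.Str.lower p == "true" || PySem.Str.lower p == "false" then
      some (PySem.Str.lower p == "true")
    else pvFindV6 rest

def parse_option_def_key (s : String) : Option String × Option Bool × Option String :=
  if s == "" then (none, none, none)
  else
    let parts := (PySem.Str.split? s ".").getD []   -- sep "." ≠ "" so split? is always some
    let code := pvFindCode parts.reverse
    let space := parts.head?   -- 'parts[0] if parts else None'
    let is_v6 := pvFindV6 parts
    (space, is_v6, code)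

-- ===== PORT B =====
-- Source B's recursive 'go': tail first, then the head overrides v6 / fills code if none
def pvGo : List String → Option Bool × Option String
  | [] => (none, none)
  | p :: rest =>
    let st := pvGo rest
    let low := PySem.Str.lower p
    let v6 := if low == "true" || low == "false" then some (low == "true") else st.1
    let code := if st.2 == none && PySem.Str.strIsdigit p then some p else st.2
    (v6, code)

def parse_option_def_key_alt (s : String) : Option String × Option Bool × Option String :=
  if s == "" then (none, none, none)
  else
    let parts := (PySem.Str.split? s ".").getD []   -- sep "." ≠ "" so split? is always some
    let st := pvGo parts
    (parts.head?, st.1, st.2)   -- 'parts[0]' on the never-empty split result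

-- ===== PRECONDITION & SPEC =====
def Spec_parse_option_def_key (s : String) (out : Option String × Option Bool × Option String) : Prop := out = parse_option_def_key_alt s
instance (s : String) (out : Option String × Option Bool × Option String) : Decidable (Spec_parse_option_def_key s out) := by unfold Spec_parse_option_def_key; infer_instance

-- ===== CLAIM (what is proved, stated in full; the proofs are below) =====
def Claim_equal_parse_option_def_key : Prop := ∀ (s : String), Dom_parse_option_def_key s → Spec_parse_option_def_key s (parse_option_def_key s)

-- ===== LEMMAS AND PROOFS =====

theorem pvFindCode_append (xs ys : List String) :
    pvFindCode (xs ++ ys) = (pvFindCode xs).or (pvFindCode ys) := by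
  induction xs with
  | nil => simp [pvFindCode]
  | cons p rest ih =>
    simp only [List.cons_append, pvFindCode]
    split <;> simp [ih]

theorem pvGo_eq (l : List String) :
    pvGo l = (pvFindV6 l, pvFindCode l.reverse) := by
  induction l with
  | nil => simp [pvGo, pvFindV6, pvFindCode]
  | cons p rest ih =>
    simp only [pvGo, ih, pvFindV6, List.reverse_cons, pvFindCode_append]
    cases h : pvFindCode rest.reverse with
    | some c => simp
    | none => simp [pvFindCode]

-- ===== VERDICT (by name: the statement is the Claim_ definition above) =====
theorem parse_option_def_key_spec : Claim_equal_parse_option_def_key := by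
  intro s _
  unfold Spec_parse_option_def_key parse_option_def_key parse_option_def_key_alt
  split
  · rfl
  · simp [pvGo_eq]
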